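-- pv_equiv track=rewrite | github.com/irisbur/coding-challenges | Others/IntroToCSExam.py | alternate_helper
-- ===== SOURCE A (Python) =====
-- def alternate_helper(n, increasing):
--     if n < 10:
--         return True
--
--     last_digit = n % 10
--     next_to_last_digit = (n % 100) // 10
--
--     if ((increasing and next_to_last_digit < last_digit) or
--             (not increasing and next_to_last_digit > last_digit)):
--         return alternate_helper(n // 10, not increasing)
--     return False
-- ===== SOURCE B (Python) =====
-- def alternate_helper(n, increasing):
--     if n < 10:
--         return True
--     digits = []
--     m = n
--     while m > 0:
--         digits.append(m % 10)
--         m //= 10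
--     ok = True
--     inc = increasing
--     for a, b in zip(digits[1:], digits):
--         if inc:
--             ok = ok and a < b
--         else:
--             ok = ok and a > b
--         inc = not inc
--     return ok
-- ===== Notes on version B (the rewrite author's own statement) =====
-- stated objective: alternative
-- what changed: A's tail recursion recomputing n%10 and (n%100)//10 at each level is replaced by extracting the digit list once with a while loop and then folding one alternation check (with a toggling flag) over adjacent digit pairs via zip.
import Mathlib
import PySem

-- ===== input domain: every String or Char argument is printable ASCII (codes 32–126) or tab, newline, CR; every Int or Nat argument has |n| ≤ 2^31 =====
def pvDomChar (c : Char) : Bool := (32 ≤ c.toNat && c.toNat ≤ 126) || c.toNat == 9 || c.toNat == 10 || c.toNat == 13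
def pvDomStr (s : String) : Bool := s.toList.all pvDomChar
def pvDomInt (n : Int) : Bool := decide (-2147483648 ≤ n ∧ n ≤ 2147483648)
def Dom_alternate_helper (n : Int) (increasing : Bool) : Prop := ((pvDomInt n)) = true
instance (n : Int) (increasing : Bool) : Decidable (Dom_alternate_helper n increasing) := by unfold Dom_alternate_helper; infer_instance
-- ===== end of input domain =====

-- B extracts the digit list once and folds one alternation check over adjacent pairs,
-- instead of A's recursion recomputing mod/div conditions; alternative decomposition, same cost.

-- ===== PORT A =====
def alternate_helper (n : Int) (increasing : Bool) : Bool :=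
  if n < 10 then true
  else
    let last_digit := PySem.Int.mod n 10
    let next_to_last_digit := PySem.Int.floordiv (PySem.Int.mod n 100) 10
    if (increasing && decide (next_to_last_digit < last_digit)) ||
       (!increasing && decide (next_to_last_digit > last_digit)) then
      alternate_helper (PySem.Int.floordiv n 10) (!increasing)
    else false
termination_by n.toNat
decreasing_by
  rw [PySem.Int.floordiv_eq_ediv_of_pos (by omega : (0:Int) < 10)]
  omega

-- ===== PORT B =====
-- the `while m > 0` digit-extraction loop of Source B
def pvDigits (m : Int) : List Int :=
  if 0 < m then PySem.Int.mod m 10 :: pvDigits (PySem.Int.floordiv m 10) else []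
termination_by m.toNat
decreasing_by
  rw [PySem.Int.floordiv_eq_ediv_of_pos (by omega : (0:Int) < 10)]
  omega

-- the body of Source B's `for a, b in zip(...)` loop, state = (ok, inc)
def pvStep (st : Bool × Bool) (ab : Int × Int) : Bool × Bool :=
  if st.2 then (st.1 && decide (ab.1 < ab.2), !st.2)
  else (st.1 && decide (ab.1 > ab.2), !st.2)

def alternate_helper_alt (n : Int) (increasing : Bool) : Bool :=
  if n < 10 then true
  else
    let digits := pvDigits n
    -- digits[1:] is digits.drop 1
    (((digits.drop 1).zip digits).foldl pvStep (true, increasing)).1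

-- ===== PRECONDITION & SPEC =====
def Spec_alternate_helper (n : Int) (increasing : Bool) (out : Bool) : Prop := out = alternate_helper_alt n increasing
instance (n : Int) (increasing : Bool) (out : Bool) : Decidable (Spec_alternate_helper n increasing out) := by unfold Spec_alternate_helper; infer_instance

-- ===== CLAIM (what is proved, stated in full; the proofs are below) =====
def Claim_equal_alternate_helper : Prop := ∀ (n : Int) (increasing : Bool), Dom_alternate_helper n increasing → Spec_alternate_helper n increasing (alternate_helper n increasing)

-- ===== LEMMAS AND PROOFS =====

-- the pair-checking fold of B, as a function of the digit list (proof helper)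
def pvG (ds : List Int) (inc : Bool) : Bool :=
  (((ds.drop 1).zip ds).foldl pvStep (true, inc)).1

-- the ok-component of the fold factors through the initial ok flag
theorem pv_foldl_fst (l : List (Int × Int)) : ∀ (ok inc : Bool),
    ((l.foldl pvStep (ok, inc)).1) = (ok && (l.foldl pvStep (true, inc)).1) := by
  induction l with
  | nil => intro ok inc; simp
  | cons hd tl ih =>
      intro ok inc
      cases ok
      · simp only [List.foldl_cons, pvStep, Bool.false_and, ite_self]
        rw [ih false]
        simp
      · simp [List.foldl_cons, pvStep]

theorem pvG_cons (d0 d1 : Int) (ds : List Int) (inc : Bool) :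
    pvG (d0 :: d1 :: ds) inc =
      ((if inc then decide (d1 < d0) else decide (d1 > d0)) && pvG (d1 :: ds) (!inc)) := by
  show ((((d1, d0) :: ds.zip (d1 :: ds)).foldl pvStep (true, inc)).1) = _
  rw [List.foldl_cons]
  by_cases h : inc <;>
    simp only [pvStep, h, if_true, Bool.true_and,
      Bool.not_true, Bool.not_false] <;>
    rw [pv_foldl_fst] <;> rfl

theorem pvDigits_pos (m : Int) (h : 0 < m) :
    pvDigits m = PySem.Int.mod m 10 :: pvDigits (PySem.Int.floordiv m 10) := by
  rw [pvDigits]; simp [h]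

theorem pvDigits_nonpos (m : Int) (h : ¬ 0 < m) : pvDigits m = [] := by
  rw [pvDigits]; simp [h]

theorem alt_eq_pvG (n : Int) (inc : Bool) :
    alternate_helper_alt n inc = if n < 10 then true else pvG (pvDigits n) inc := rfl

-- one unrolling of B for n ≥ 10
theorem alt_step (n : Int) (inc : Bool) (h : 10 ≤ n) :
    alternate_helper_alt n inc =
      ((if inc then decide (PySem.Int.mod (PySem.Int.floordiv n 10) 10 < PySem.Int.mod n 10)
        else decide (PySem.Int.mod (PySem.Int.floordiv n 10) 10 > PySem.Int.mod n 10)) &&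
       alternate_helper_alt (PySem.Int.floordiv n 10) (!inc)) := by
  have h10 : (0:Int) < 10 := by omega
  have hqe : PySem.Int.floordiv n 10 = n / 10 := PySem.Int.floordiv_eq_ediv_of_pos h10
  have hq : 0 < PySem.Int.floordiv n 10 := by rw [hqe]; omega
  rw [alt_eq_pvG n inc, if_neg (by omega : ¬ n < 10)]
  rw [pvDigits_pos n (by omega), pvDigits_pos _ hq, pvG_cons]
  rw [alt_eq_pvG]
  by_cases hq10 : PySem.Int.floordiv n 10 < 10
  · rw [if_pos hq10]
    have h0 : pvDigits (PySem.Int.floordiv (PySem.Int.floordiv n 10) 10) = [] := by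
      apply pvDigits_nonpos
      rw [hqe, PySem.Int.floordiv_eq_ediv_of_pos h10]
      rw [hqe] at hq10
      omega
    rw [h0]
    show _ = ((if inc then _ else _) && true)
    simp [pvG]
  · rw [if_neg hq10, pvDigits_pos _ (by omega : 0 < PySem.Int.floordiv n 10)]

theorem pv_main : ∀ (k : Nat) (n : Int) (inc : Bool), n.toNat ≤ k →
    alternate_helper n inc = alternate_helper_alt n inc := by
  intro k
  induction k with
  | zero =>
      intro n inc hk
      have hn : n < 10 := by omega
      rw [alternate_helper, if_pos hn, alt_eq_pvG, if_pos hn]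
  | succ k ih =>
      intro n inc hk
      by_cases hn : n < 10
      · rw [alternate_helper, if_pos hn, alt_eq_pvG, if_pos hn]
      · have h10 : (0:Int) < 10 := by omega
        have hqe : PySem.Int.floordiv n 10 = n / 10 := PySem.Int.floordiv_eq_ediv_of_pos h10
        rw [alternate_helper, if_neg hn, alt_step n inc (by omega)]
        have hntl : PySem.Int.floordiv (PySem.Int.mod n 100) 10
            = PySem.Int.mod (PySem.Int.floordiv n 10) 10 := by
          rw [PySem.Int.floordiv_eq_ediv_of_pos h10,
              PySem.Int.floordiv_eq_ediv_of_pos (by omega : (0:Int) < 10),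
              PySem.Int.mod_eq_emod_of_pos (by omega : (0:Int) < 100),
              PySem.Int.mod_eq_emod_of_pos h10]
          omega
        rw [hntl]
        have hrec := ih (PySem.Int.floordiv n 10) (!inc) (by rw [hqe]; omega)
        cases hi : inc <;>
          split_ifs with hc <;> simp_all

-- ===== VERDICT (by name: the statement is the Claim_ definition above) =====
theorem alternate_helper_spec : Claim_equal_alternate_helper := by
  intro n inc _
  unfold Spec_alternate_helper
  exact pv_main n.toNat n inc le_rfl
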